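-- pv_equiv track=rewrite | github.com/Vir2S/hybrid-algorithms | sorting/bitonic_merge_sort.py | bitonic_merge
-- ===== SOURCE A (Python) =====
-- def bitonic_merge(arr, up):
--     n = len(arr)
--
--     if n <= 1:
--         return arr
--
--     # Compare and swap
--     for i in range(n // 2):
--
--         if (arr[i] > arr[i + n // 2]) == up:
--             arr[i], arr[i + n // 2] = arr[i + n // 2], arr[i]
--
--     # Recursively merge subarrays
--     first_half = bitonic_merge(arr[:n // 2], up)
--     second_half = bitonic_merge(arr[n // 2:], up)
--     return first_half + second_half
-- ===== SOURCE B (Python) =====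
-- def bitonic_merge(arr, up):
--     # Iterative work-list version: the top-level compare-swap mutates arr
--     # in place (same observable mutation as the recursive original); all
--     # deeper work happens on sliced copies, assembled left-to-right.
--     if len(arr) <= 1:
--         return arr
--     out = []
--     stack = [arr]
--     while stack:
--         seg = stack.pop()
--         m = len(seg)
--         if m <= 1:
--             out.extend(seg)
--             continue
--         k = m // 2
--         for i in range(k):
--             if (seg[i] > seg[i + k]) == up:
--                 seg[i], seg[i + k] = seg[i + k], seg[i]
--         stack.append(seg[k:])
--         stack.append(seg[:k])
--     return out
-- ===== Notes on version B (the rewrite author's own statement) =====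
-- stated objective: alternative
-- what changed: Replaces the divide-and-conquer recursion by an explicit work-list (stack) iteration: pop a segment, apply its compare-swap pass, push its two half-copies, and collect length<=1 segments left-to-right into the output.
import Mathlib
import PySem

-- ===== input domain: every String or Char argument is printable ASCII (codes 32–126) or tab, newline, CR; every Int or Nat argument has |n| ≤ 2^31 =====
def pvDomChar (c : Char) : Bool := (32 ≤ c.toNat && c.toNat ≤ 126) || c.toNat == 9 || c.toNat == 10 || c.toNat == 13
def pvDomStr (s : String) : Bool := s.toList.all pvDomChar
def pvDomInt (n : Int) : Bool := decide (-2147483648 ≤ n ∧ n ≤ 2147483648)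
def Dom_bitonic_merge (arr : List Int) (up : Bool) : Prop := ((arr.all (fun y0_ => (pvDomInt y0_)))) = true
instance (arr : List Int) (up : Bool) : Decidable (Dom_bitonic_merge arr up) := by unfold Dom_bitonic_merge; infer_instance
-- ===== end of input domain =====

-- B replaces the recursion by an explicit work-list iteration (same return value; the
-- Python A mutates arr's first compare-swap pass in place and B performs the same
-- top-level mutation; the equivalence proved here is about the return value).

-- ===== PORT A =====
-- one step of A's compare-and-swap loop: indices i and i+h are always in range
-- (i < n/2, h = n/2), so getD's default is never used
def csSwap (up : Bool) (h : Nat) (l : List Int) (i : Nat) : List Int :=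
  if (decide (l.getD i 0 > l.getD (i + h) 0)) = up then
    (l.set i (l.getD (i + h) 0)).set (i + h) (l.getD i 0)
  else l

-- A's recursion, with a fuel counter as the totality guard (fuel = arr.length is
-- always enough: each recursive call strictly shrinks the list, so 0 is never hit)
def bmA (up : Bool) : Nat → List Int → List Int
  | 0, arr => arr
  | fuel + 1, arr =>
    let n := arr.length
    if n ≤ 1 then arr
    else
      let arr2 := (List.range (n / 2)).foldl (csSwap up (n / 2)) arr
      bmA up fuel (arr2.take (n / 2)) ++ bmA up fuel (arr2.drop (n / 2))

def bitonic_merge (arr : List Int) (up : Bool) : List Int := bmA up arr.length arr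

-- ===== PORT B =====
-- one step of B's inner compare-and-swap pass (same in-range indices)
def segSwap (up : Bool) (k : Nat) (seg : List Int) (i : Nat) : List Int :=
  if (decide (seg.getD i 0 > seg.getD (i + k) 0)) = up then
    (seg.set i (seg.getD (i + k) 0)).set (i + k) (seg.getD i 0)
  else seg

-- B's while loop over the work list: pop a segment, compare-swap it, push its two
-- half-copies; short segments go to the output. Fuel is the totality guard (the
-- initial n*n+1 dominates the loop's decreasing potential, so 0 is never hit).
def bmGo (up : Bool) : Nat → List Int → List (List Int) → List Int
  | _, out, [] => out
  | 0, out, _ => out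
  | fuel + 1, out, seg :: rest =>
    let m := seg.length
    if m ≤ 1 then bmGo up fuel (out ++ seg) rest
    else
      let k := m / 2
      let seg2 := (List.range k).foldl (segSwap up k) seg
      bmGo up fuel out (seg2.take k :: seg2.drop k :: rest)

def bitonic_merge_alt (arr : List Int) (up : Bool) : List Int :=
  if arr.length ≤ 1 then arr
  else bmGo up (arr.length * arr.length + 1) [] [arr]

-- ===== PRECONDITION & SPEC =====
def Spec_bitonic_merge (arr : List Int) (up : Bool) (out : List Int) : Prop := out = bitonic_merge_alt arr up
instance (arr : List Int) (up : Bool) (out : List Int) : Decidable (Spec_bitonic_merge arr up out) := by unfold Spec_bitonic_merge; infer_instance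

-- ===== CLAIM (what is proved, stated in full; the proofs are below) =====
def Claim_equal_bitonic_merge : Prop := ∀ (arr : List Int) (up : Bool), Dom_bitonic_merge arr up → Spec_bitonic_merge arr up (bitonic_merge arr up)

-- ===== LEMMAS AND PROOFS =====

theorem segSwap_eq : segSwap = csSwap := rfl

theorem csSwap_length (up : Bool) (h : Nat) (l : List Int) (i : Nat) :
    (csSwap up h l i).length = l.length := by
  unfold csSwap; split <;> simp

theorem foldl_csSwap_length (up : Bool) (h : Nat) (r : List Nat) (l : List Int) :
    (r.foldl (csSwap up h) l).length = l.length := by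
  induction r generalizing l with
  | nil => rfl
  | cons a t ih => simp [List.foldl, ih, csSwap_length]

-- the fuel argument of bmA is irrelevant once it is at least the list's length
theorem bmA_fuel (up : Bool) : ∀ (f1 : Nat) (f2 : Nat) (arr : List Int),
    arr.length ≤ f1 → arr.length ≤ f2 → bmA up f1 arr = bmA up f2 arr := by
  intro f1
  induction f1 with
  | zero =>
    intro f2 arr h1 _
    have : arr = [] := List.eq_nil_of_length_eq_zero (by omega)
    subst this
    cases f2 <;> simp [bmA]
  | succ f ih =>
    intro f2 arr h1 h2
    cases f2 with
    | zero =>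
      have : arr = [] := List.eq_nil_of_length_eq_zero (by omega)
      subst this; simp [bmA]
    | succ g =>
      by_cases h : arr.length ≤ 1
      · simp [bmA, h]
      · simp only [bmA, h, if_false]
        have hl := foldl_csSwap_length up (arr.length / 2) (List.range (arr.length / 2)) arr
        have ht : (((List.range (arr.length / 2)).foldl (csSwap up (arr.length / 2)) arr).take (arr.length / 2)).length ≤ f := by
          rw [List.length_take, hl]; omega
        have hd : (((List.range (arr.length / 2)).foldl (csSwap up (arr.length / 2)) arr).drop (arr.length / 2)).length ≤ f := by
          rw [List.length_drop, hl]; omega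
        rw [ih g _ ht (by rw [List.length_take, hl]; omega),
            ih g _ hd (by rw [List.length_drop, hl]; omega)]

theorem bitonic_merge_short (arr : List Int) (up : Bool) (h : arr.length ≤ 1) :
    bitonic_merge arr up = arr := by
  cases arr with
  | nil => rfl
  | cons a t =>
    cases t with
    | nil => rfl
    | cons b u => exact absurd h (by simp)

theorem bitonic_merge_long (arr : List Int) (up : Bool) (h : ¬ arr.length ≤ 1) :
    bitonic_merge arr up =
      bitonic_merge (((List.range (arr.length / 2)).foldl (csSwap up (arr.length / 2)) arr).take (arr.length / 2)) up ++
      bitonic_merge (((List.range (arr.length / 2)).foldl (csSwap up (arr.length / 2)) arr).drop (arr.length / 2)) up := by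
  unfold bitonic_merge
  obtain ⟨f, hf⟩ : ∃ f, arr.length = f + 1 := ⟨arr.length - 1, by omega⟩
  rw [hf]
  simp only [bmA]
  rw [← hf]
  simp only [h, if_false]
  have hl := foldl_csSwap_length up (arr.length / 2) (List.range (arr.length / 2)) arr
  rw [bmA_fuel up f
        (((List.range (arr.length / 2)).foldl (csSwap up (arr.length / 2)) arr).take (arr.length / 2)).length
        (((List.range (arr.length / 2)).foldl (csSwap up (arr.length / 2)) arr).take (arr.length / 2))
        (by rw [List.length_take, hl]; omega) le_rfl,
      bmA_fuel up f
        (((List.range (arr.length / 2)).foldl (csSwap up (arr.length / 2)) arr).drop (arr.length / 2)).length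
        (((List.range (arr.length / 2)).foldl (csSwap up (arr.length / 2)) arr).drop (arr.length / 2))
        (by rw [List.length_drop, hl]; omega) le_rfl]

-- the loop potential: fuel never runs out while it is at least this sum
def pvPot (stack : List (List Int)) : Nat :=
  (stack.map (fun s => s.length * s.length + 1)).sum

theorem halves_sq_lt (m : Nat) (hm : 2 ≤ m) :
    m / 2 * (m / 2) + 1 + ((m - m / 2) * (m - m / 2) + 1) ≤ m * m := by
  have h1 : 1 ≤ m / 2 := by omega
  have h2 : m = m / 2 + (m - m / 2) := by omega
  nlinarith [Nat.mul_le_mul h1 (show 1 ≤ m - m / 2 by omega)]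

-- the work-list loop emits, in order, A's result for each pending segment
theorem bmGo_spec (up : Bool) : ∀ (fuel : Nat) (out : List Int) (stack : List (List Int)),
    pvPot stack ≤ fuel →
    bmGo up fuel out stack = out ++ (stack.map (fun s => bitonic_merge s up)).flatten := by
  intro fuel
  induction fuel with
  | zero =>
    intro out stack hpot
    cases stack with
    | nil => simp [bmGo]
    | cons s r => exfalso; simp [pvPot] at hpot
  | succ f ih =>
    intro out stack hpot
    cases stack with
    | nil => simp [bmGo]
    | cons seg rest =>
      by_cases h : seg.length ≤ 1
      · simp only [bmGo, h, if_pos]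
        rw [ih (out ++ seg) rest (by simp [pvPot] at hpot ⊢; omega)]
        simp only [List.map_cons, List.flatten_cons]
        rw [bitonic_merge_short seg up h]
        simp
      · simp only [bmGo, h, if_false, segSwap_eq]
        have hsq := halves_sq_lt seg.length (by omega)
        have hl := foldl_csSwap_length up (seg.length / 2) (List.range (seg.length / 2)) seg
        have htl : (((List.range (seg.length / 2)).foldl (csSwap up (seg.length / 2)) seg).take (seg.length / 2)).length = seg.length / 2 := by
          rw [List.length_take, hl]; omega
        have hdl : (((List.range (seg.length / 2)).foldl (csSwap up (seg.length / 2)) seg).drop (seg.length / 2)).length = seg.length - seg.length / 2 := by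
          rw [List.length_drop, hl]
        rw [ih out _ (by simp [pvPot, htl, hdl] at *; omega)]
        simp only [List.map_cons, List.flatten_cons]
        rw [bitonic_merge_long seg up h]
        simp [List.append_assoc]

-- ===== VERDICT (by name: the statement is the Claim_ definition above) =====
theorem bitonic_merge_spec : Claim_equal_bitonic_merge := by
  intro arr up _
  unfold Spec_bitonic_merge bitonic_merge_alt
  by_cases h : arr.length ≤ 1
  · simp [h, bitonic_merge_short arr up h]
  · simp only [h, if_false]
    rw [bmGo_spec up (arr.length * arr.length + 1) [] [arr] (by simp [pvPot])]
    simp
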